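-- pv_equiv track=rewrite | github.com/arifkhan1990/Competitive-Programming | Codingninjas/Array/XOR-Query.py | xorQuery
-- ===== SOURCE A (Python) =====
-- def xorQuery(queries):
--     ans = []
--     for i in queries:
--         if i[0] == 1:
--             ans.append(i[1])
--         else:
--             for j in range(len(ans)):
--                 ans[j] ^= i[1]
--     return ans
-- ===== SOURCE B (Python) =====
-- def xorQuery(queries):
--     # Lazy XOR: keep one pending accumulator; store v ^ pending on append,
--     # apply the final pending once at the end.
--     pending = 0
--     stored = []
--     for q in queries:
--         if q[0] == 1:
--             stored.append(q[1] ^ pending)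
--         else:
--             pending ^= q[1]
--     return [v ^ pending for v in stored]
-- ===== Notes on version B (the rewrite author's own statement) =====
-- stated objective: alternative
-- what changed: Replaces the inner per-type-2-query rescan that XORs every stored element by a single lazy pending accumulator: values are stored pre-XORed with the pending mask and the final mask is applied once at the end.
-- outside the precondition, e.g. on xorQuery([[2]]): A returns [], B raises IndexError
import Mathlib
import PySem

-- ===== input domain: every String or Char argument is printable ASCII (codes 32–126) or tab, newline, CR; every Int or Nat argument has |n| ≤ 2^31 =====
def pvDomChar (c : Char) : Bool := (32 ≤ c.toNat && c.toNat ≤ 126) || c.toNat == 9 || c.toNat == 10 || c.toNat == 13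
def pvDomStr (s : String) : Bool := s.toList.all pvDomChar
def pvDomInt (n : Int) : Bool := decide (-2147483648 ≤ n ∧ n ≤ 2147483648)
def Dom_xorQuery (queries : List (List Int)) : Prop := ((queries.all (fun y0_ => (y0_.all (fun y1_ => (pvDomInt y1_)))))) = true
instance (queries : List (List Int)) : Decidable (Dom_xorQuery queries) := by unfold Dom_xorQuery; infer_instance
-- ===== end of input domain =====

-- B replaces A's per-type-2-query rescan of the whole array by one lazy pending-XOR
-- accumulator applied once at the end; return-value equivalence only.

-- ===== PORT A =====
-- for i in queries: if i[0]==1: ans.append(i[1]) else: for j in range(len(ans)): ans[j] ^= i[1]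
-- (the in-place index loop is transcribed as the elementwise update of ans; q[k] via pyGetD,
-- exact on Pre_ where every query has length ≥ 2)
def xorQuery (queries : List (List Int)) : List Int :=
  queries.foldl
    (fun ans i =>
      if PySem.List.pyGetD i 0 0 = 1 then
        ans ++ [PySem.List.pyGetD i 1 0]
      else
        ans.map (fun a => PySem.Int.bxor a (PySem.List.pyGetD i 1 0)))
    []

-- ===== PORT B =====
-- lazy accumulator: (stored, pending); append q[1]^pending, type-2 just pending ^= q[1];
-- final pass applies pending once
def xorQuery_alt (queries : List (List Int)) : List Int :=
  let st := queries.foldl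
    (fun (s : List Int × Int) q =>
      if PySem.List.pyGetD q 0 0 = 1 then
        (s.1 ++ [PySem.Int.bxor (PySem.List.pyGetD q 1 0) s.2], s.2)
      else
        (s.1, PySem.Int.bxor s.2 (PySem.List.pyGetD q 1 0)))
    ([], 0)
  st.1.map (fun v => PySem.Int.bxor v st.2)

-- ===== PRECONDITION & SPEC =====
-- Pre_ excludes queries shorter than 2 elements: Python A raises IndexError on i[0]/i[1]
-- there, except for a type-2 query while the array is still empty ([[2]] returns []),
-- a value B's lazy algorithm cannot give since it must read q[1] immediately.
def Pre_xorQuery (queries : List (List Int)) : Prop :=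
  ∀ q ∈ queries, 2 ≤ q.length
instance (queries : List (List Int)) : Decidable (Pre_xorQuery queries) := by
  unfold Pre_xorQuery; infer_instance

def pvWitness_xorQuery : List (List Int) := [[1, 3], [2, 5], [1, 4], [2, 1]]

def Spec_xorQuery (queries : List (List Int)) (out : List Int) : Prop := out = xorQuery_alt queries
instance (queries : List (List Int)) (out : List Int) : Decidable (Spec_xorQuery queries out) := by unfold Spec_xorQuery; infer_instance

-- ===== CLAIM (what is proved, stated in full; the proofs are below) =====
def Claim_equal_xorQuery : Prop := ∀ (queries : List (List Int)), Dom_xorQuery queries → Pre_xorQuery queries → Spec_xorQuery queries (xorQuery queries)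

-- ===== LEMMAS AND PROOFS =====


-- PySem.Int.bxor agrees with core Int.xor
theorem pvBxor_eq_xor (a b : Int) : PySem.Int.bxor a b = Int.xor a b := by
  unfold PySem.Int.bxor Int.xor
  rcases a with a | a <;> rcases b with b | b <;> simp [Int.negSucc_eq] <;> omega

theorem pvBxor_assoc (a b c : Int) :
    PySem.Int.bxor (PySem.Int.bxor a b) c = PySem.Int.bxor a (PySem.Int.bxor b c) := by
  simp only [pvBxor_eq_xor]
  rcases a with a | a <;> rcases b with b | b <;> rcases c with c | c <;>
    simp [Int.xor, Nat.xor_assoc]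

-- loop invariant: A's array equals B's stored values each XORed with B's pending mask
theorem xorQuery_loop_eq (queries : List (List Int)) (stored : List Int) (pending : Int) :
    queries.foldl
      (fun ans i =>
        if PySem.List.pyGetD i 0 0 = 1 then
          ans ++ [PySem.List.pyGetD i 1 0]
        else
          ans.map (fun a => PySem.Int.bxor a (PySem.List.pyGetD i 1 0)))
      (stored.map (fun v => PySem.Int.bxor v pending))
    =
    (queries.foldl
      (fun (s : List Int × Int) q =>
        if PySem.List.pyGetD q 0 0 = 1 then
          (s.1 ++ [PySem.Int.bxor (PySem.List.pyGetD q 1 0) s.2], s.2)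
        else
          (s.1, PySem.Int.bxor s.2 (PySem.List.pyGetD q 1 0)))
      (stored, pending)).1.map
      (fun v => PySem.Int.bxor v
        (queries.foldl
          (fun (s : List Int × Int) q =>
            if PySem.List.pyGetD q 0 0 = 1 then
              (s.1 ++ [PySem.Int.bxor (PySem.List.pyGetD q 1 0) s.2], s.2)
            else
              (s.1, PySem.Int.bxor s.2 (PySem.List.pyGetD q 1 0)))
          (stored, pending)).2) := by
  induction queries generalizing stored pending with
  | nil => simp
  | cons q qs ih =>
    simp only [List.foldl_cons]
    by_cases h : PySem.List.pyGetD q 0 0 = 1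
    · simp only [h, if_pos rfl]
      have : (stored.map (fun v => PySem.Int.bxor v pending)) ++ [PySem.List.pyGetD q 1 0]
          = (stored ++ [PySem.Int.bxor (PySem.List.pyGetD q 1 0) pending]).map
              (fun v => PySem.Int.bxor v pending) := by
        simp [pvBxor_assoc]
      rw [this]; exact ih _ _
    · simp only [if_neg h]
      have : (stored.map (fun v => PySem.Int.bxor v pending)).map
              (fun a => PySem.Int.bxor a (PySem.List.pyGetD q 1 0))
          = stored.map (fun v => PySem.Int.bxor v (PySem.Int.bxor pending (PySem.List.pyGetD q 1 0))) := by
        simp [pvBxor_assoc]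
      rw [this]; exact ih _ _

-- ===== VERDICT (by name: the statement is the Claim_ definition above) =====
theorem xorQuery_spec : Claim_equal_xorQuery := by
  intro queries _ _
  unfold Spec_xorQuery xorQuery xorQuery_alt
  have h := xorQuery_loop_eq queries [] 0
  simpa using h
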